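-- pv_equiv track=rewrite | github.com/ajaflorez-utec/icc-2019-1 | Solución PCs/PC2/Divisible11.py | isDivisible11
-- ===== SOURCE A (Python) =====
-- def isDivisible11( numero ):
--   sumaPar = 0
--   sumaImpar = 0
--   isPar = True
--   while numero > 0:
--     if isPar:
--       sumaPar += (numero % 10)
--       isPar = False
--     else:
--       sumaImpar += (numero % 10)
--       isPar = True
--     numero = numero // 10
--   if sumaPar - sumaImpar == 0:
--     return "SI"
--   else:
--     return "NO"
-- ===== SOURCE B (Python) =====
-- def isDivisible11(numero):
--   digits = []
--   while numero > 0: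
--     digits.append(numero % 10)
--     numero = numero // 10
--   sumaPar = sum(digits[0::2])
--   sumaImpar = sum(digits[1::2])
--   return "SI" if sumaPar == sumaImpar else "NO"
-- ===== Notes on version B (the rewrite author's own statement) =====
-- stated objective: alternative
-- what changed: B first materialises the digit list with a plain extraction loop, then computes the two alternating sums as separate step-2 slice sums, instead of A's single pass routing each digit through a toggled boolean.
import Mathlib
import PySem

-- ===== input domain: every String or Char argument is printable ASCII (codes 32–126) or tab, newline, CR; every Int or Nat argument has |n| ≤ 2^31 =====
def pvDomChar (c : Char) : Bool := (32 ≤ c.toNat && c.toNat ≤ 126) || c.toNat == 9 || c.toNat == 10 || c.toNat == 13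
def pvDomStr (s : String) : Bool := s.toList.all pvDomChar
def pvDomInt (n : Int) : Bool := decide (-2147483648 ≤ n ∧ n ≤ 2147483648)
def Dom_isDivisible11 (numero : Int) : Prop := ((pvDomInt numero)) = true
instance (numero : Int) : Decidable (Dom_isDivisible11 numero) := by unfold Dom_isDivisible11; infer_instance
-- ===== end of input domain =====

-- B builds the digit list first, then sums the two step-2 slices; A toggles a boolean in one pass. Return values agree everywhere; alternative decomposition, same cost.

-- ===== PORT A =====
-- A's while loop as structural recursion over the same state (sumaPar, sumaImpar, isPar).
def isDivisible11Loop (numero sumaPar sumaImpar : Int) (isPar : Bool) : Int × Int :=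
  if numero > 0 then
    if isPar then
      isDivisible11Loop (PySem.Int.floordiv numero 10) (sumaPar + PySem.Int.mod numero 10) sumaImpar false
    else
      isDivisible11Loop (PySem.Int.floordiv numero 10) sumaPar (sumaImpar + PySem.Int.mod numero 10) true
  else (sumaPar, sumaImpar)
termination_by numero.toNat
decreasing_by
  all_goals
    have h10 : (0:Int) < 10 := by omega
    rw [PySem.Int.floordiv_eq_ediv_of_pos h10]; omega

def isDivisible11 (numero : Int) : String :=
  let p := isDivisible11Loop numero 0 0 true
  if p.1 - p.2 = 0 then "SI" else "NO"

-- ===== PORT B =====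
-- B's digit-extraction while loop.
def digitsOf (numero : Int) : List Int :=
  if numero > 0 then
    PySem.Int.mod numero 10 :: digitsOf (PySem.Int.floordiv numero 10)
  else []
termination_by numero.toNat
decreasing_by
  have h10 : (0:Int) < 10 := by omega
  rw [PySem.Int.floordiv_eq_ediv_of_pos h10]; omega

-- hand port of the step-2 slice xs[0::2] (exact: every second element starting at index 0)
def everySecond : List Int → List Int
  | [] => []
  | [a] => [a]
  | a :: _ :: t => a :: everySecond t

def isDivisible11_alt (numero : Int) : String :=
  let digits := digitsOf numero
  let sumaPar := (everySecond digits).sum          -- digits[0::2]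
  let sumaImpar := (everySecond digits.tail).sum   -- digits[1::2]
  if sumaPar = sumaImpar then "SI" else "NO"

-- ===== PRECONDITION & SPEC =====
def Spec_isDivisible11 (numero : Int) (out : String) : Prop := out = isDivisible11_alt numero
instance (numero : Int) (out : String) : Decidable (Spec_isDivisible11 numero out) := by unfold Spec_isDivisible11; infer_instance

-- ===== CLAIM (what is proved, stated in full; the proofs are below) =====
def Claim_equal_isDivisible11 : Prop := ∀ (numero : Int), Dom_isDivisible11 numero → Spec_isDivisible11 numero (isDivisible11 numero)

-- ===== LEMMAS AND PROOFS =====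

theorem isDivisible11Loop_eq (k : Nat) :
    ∀ (n sp si : Int), n.toNat ≤ k →
      (isDivisible11Loop n sp si true
          = (sp + (everySecond (digitsOf n)).sum, si + (everySecond (digitsOf n).tail).sum))
      ∧ (isDivisible11Loop n sp si false
          = (sp + (everySecond (digitsOf n).tail).sum, si + (everySecond (digitsOf n)).sum)) := by
  induction k with
  | zero =>
    intro n sp si hn
    have hn0 : ¬ n > 0 := by omega
    constructor <;> (rw [isDivisible11Loop, digitsOf]; simp [hn0, everySecond])
  | succ k ih =>
    intro n sp si hn
    by_cases hpos : n > 0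
    · have h10 : (0:Int) < 10 := by omega
      have hm : (PySem.Int.floordiv n 10).toNat ≤ k := by
        rw [PySem.Int.floordiv_eq_ediv_of_pos h10]; omega
      have hd : digitsOf n = PySem.Int.mod n 10 :: digitsOf (PySem.Int.floordiv n 10) := by
        rw [digitsOf]; simp [hpos]
      have htail : ∀ xs d, everySecond (d :: xs) = d :: everySecond xs.tail := by
        intro xs d; cases xs <;> simp [everySecond]
      constructor
      · rw [isDivisible11Loop]; simp only [hpos, if_true]
        rw [(ih _ _ _ hm).2, hd]
        simp [htail]; ring
      · rw [isDivisible11Loop]; simp only [hpos, if_true]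
        rw [(ih _ _ _ hm).1, hd]
        simp [htail]; ring
    · constructor <;> (rw [isDivisible11Loop, digitsOf]; simp [hpos, everySecond])

-- ===== VERDICT (by name: the statement is the Claim_ definition above) =====
theorem isDivisible11_spec : Claim_equal_isDivisible11 := by
  intro n _
  unfold Spec_isDivisible11 isDivisible11 isDivisible11_alt
  have h := (isDivisible11Loop_eq n.toNat n 0 0 (le_refl _)).1
  rw [h]
  simp only [zero_add]
  by_cases hEq : (everySecond (digitsOf n)).sum = (everySecond (digitsOf n).tail).sum
  · simp [hEq]
  · have : (everySecond (digitsOf n)).sum - (everySecond (digitsOf n).tail).sum ≠ 0 := by omega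
    simp [hEq, this]
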